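-- pv_equiv track=rewrite | github.com/Tahsin-Mayeesha/Classifying-Actionable-Sentences-from-Emails | email_to_sentences.py | preprocess_email
-- ===== SOURCE A (Python) =====
-- def test_filter_words(text):
--     """ Checks if the sentences contain any filter words or not"""
--     for filter_word in filter_words:
--         if filter_word in text:
--             return False
--     else:
--         return True
--
-- def preprocess_email(email):
--     """ Preprocessing function to tokenize email text to sentences """
--     result = []
--     # Split the paragraphs first
--     email = email.split("\n\n")
--     paragraph_sentences = []
--     for item in email:
--         paragraph_sentences.extend(item.split("."))
--     for text in paragraph_sentences:
--         text = text.strip()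
--         if text != '' and test_filter_words(text) and len(text) >= text_len :
--             result.append(text)
--     return result
--
-- filter_words = ["Forwarded","Subject","<",">","From","To","cc","--","Report as of"] # these sentences don't have action words
--
-- text_len = 5 # to remove small sentences like 'gtg','lol'
-- ===== SOURCE B (Python) =====
-- filter_words = ["Forwarded","Subject","<",">","From","To","cc","--","Report as of"]
--
-- text_len = 5
--
-- def preprocess_email(email):
--     """One-pass scanner: cut the email at every "\n\n" or "." while walking it once,
--     then keep the stripped pieces that are long enough and contain no filter word."""
--     pieces = []
--     cur = []
--     i = 0
--     n = len(email)
--     while i < n: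
--         if email.startswith("\n\n", i):
--             pieces.append("".join(cur)); cur = []; i += 2
--         elif email[i] == ".":
--             pieces.append("".join(cur)); cur = []; i += 1
--         else:
--             cur.append(email[i]); i += 1
--     pieces.append("".join(cur))
--     result = []
--     for p in pieces:
--         t = p.strip()
--         if t and len(t) >= text_len and not any(w in t for w in filter_words):
--             result.append(t)
--     return result
-- ===== Notes on version B (the rewrite author's own statement) =====
-- stated objective: alternative
-- what changed: Replaced the two-level split (split on "\n\n", then per-paragraph split on "." collected with extend) and the helper with an early-return loop over filter words by a single left-to-right character scan that cuts pieces at either delimiter in one pass, with the filter expressed as not any(w in t).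
import Mathlib
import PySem

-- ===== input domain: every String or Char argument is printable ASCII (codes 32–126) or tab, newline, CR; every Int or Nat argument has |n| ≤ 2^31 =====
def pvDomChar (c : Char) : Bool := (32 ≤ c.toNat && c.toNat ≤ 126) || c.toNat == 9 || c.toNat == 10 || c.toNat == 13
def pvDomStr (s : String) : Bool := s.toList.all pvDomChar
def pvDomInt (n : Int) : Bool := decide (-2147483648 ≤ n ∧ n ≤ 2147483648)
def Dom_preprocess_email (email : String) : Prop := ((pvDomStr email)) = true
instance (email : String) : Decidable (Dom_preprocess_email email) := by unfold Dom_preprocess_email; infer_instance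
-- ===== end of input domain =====

-- B replaces A's two-level split (paragraphs, then sentences) by a single one-pass
-- character scan cutting at "\n\n" or "."; alternative decomposition, same results.

-- ===== PORT A =====
def filter_words : List String :=
  ["Forwarded","Subject","<",">","From","To","cc","--","Report as of"]

def text_len : Int := 5

-- the 'for filter_word in filter_words: if filter_word in text: return False' loop
def tfw_go (text : List Char) : List String → Bool
  | [] => true
  | w :: ws => if PySem.Chars.isIn w.toList text then false else tfw_go text ws

def test_filter_words (text : List Char) : Bool := tfw_go text filter_words

def preprocess_email (email : String) : List String :=
  let emailParts := PySem.Chars.splitOn email.toList "\n\n".toList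
  let paragraph_sentences :=
    emailParts.foldl (fun acc item => acc ++ PySem.Chars.splitOn item ".".toList) []
  paragraph_sentences.foldl (fun result text0 =>
    let text := PySem.Chars.strip text0
    if (text ≠ [] : Bool) && test_filter_words text && decide (text_len ≤ (text.length : Int))
    then result ++ [String.ofList text] else result) []

-- ===== PORT B =====
-- Source B's while loop: remaining input + current-piece accumulator;
-- 'email.startswith("\n\n", i)' is 'c = '\n' ∧ rest.head? = some '\n''
def scanB : List Char → List Char → List (List Char)
  | [], cur => [cur]
  | c :: rest, cur =>
    if c = '\n' ∧ rest.head? = some '\n' then cur :: scanB rest.tail []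
    else if c = '.' then cur :: scanB rest []
    else scanB rest (cur ++ [c])
  termination_by l => l.length
  decreasing_by
    · simp only [List.length_cons]
      simp only [List.length_tail]
      omega
    · simp
    · simp

def preprocess_email_alt (email : String) : List String :=
  (scanB email.toList []).foldl (fun result p =>
    let t := PySem.Chars.strip p
    if (t ≠ [] : Bool) && decide ((5 : Int) ≤ (t.length : Int))
        && !(filter_words.any (fun w => PySem.Chars.isIn w.toList t))
    then result ++ [String.ofList t] else result) []

-- ===== PRECONDITION & SPEC =====
def Spec_preprocess_email (email : String) (out : List String) : Prop := out = preprocess_email_alt email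
instance (email : String) (out : List String) : Decidable (Spec_preprocess_email email out) := by unfold Spec_preprocess_email; infer_instance

-- ===== CLAIM (what is proved, stated in full; the proofs are below) =====
def Claim_equal_preprocess_email : Prop := ∀ (email : String), Dom_preprocess_email email → Spec_preprocess_email email (preprocess_email email)

-- ===== LEMMAS AND PROOFS =====

theorem modifyHead_idfun {α : Type} (l : List α) : List.modifyHead (fun p : α => p) l = l := by
  cases l <;> simp

-- structural characterisation of PySem.Chars.splitOn for a nonempty sep (s :: sp)
def sps (s : Char) (sp : List Char) : List Char → List (List Char)
  | [] => [[]]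
  | c :: rest =>
    if (s :: sp).isPrefixOf (c :: rest) then
      [] :: sps s sp ((c :: rest).drop (s :: sp).length)
    else
      match sps s sp rest with
      | p :: ps => (c :: p) :: ps
      | [] => [[c]]
  termination_by l => l.length
  decreasing_by
    · simp only [List.length_drop, List.length_cons]; omega
    · simp

theorem sps_ne_nil (s : Char) (sp l : List Char) : sps s sp l ≠ [] := by
  cases l with
  | nil => simp [sps]
  | cons c rest =>
    rw [sps]
    split
    · simp
    · split <;> simp

-- the fuel-based PySem.Chars.splitOn.go equals sps (accumulators made explicit)
theorem go_eq_sps (s : Char) (sp : List Char) :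
    ∀ (fuel : Nat) (l cur : List Char) (acc : List (List Char)),
      l.length < fuel →
      PySem.Chars.splitOn.go (s :: sp) fuel l cur acc =
        acc.reverse ++ (sps s sp l).modifyHead (fun p => cur.reverse ++ p) := by
  intro fuel
  induction fuel with
  | zero => intro l cur acc h; omega
  | succ n ih =>
    intro l cur acc h
    cases l with
    | nil =>
      simp [PySem.Chars.splitOn.go, sps]
    | cons c rest =>
      rw [PySem.Chars.splitOn.go]
      by_cases hp : (s :: sp).isPrefixOf (c :: rest)
      · rw [if_pos hp]
        have hlen : ((c :: rest).drop (s :: sp).length).length < n := by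
          simp only [List.length_drop, List.length_cons] at *
          omega
        rw [ih _ _ _ hlen]
        rw [sps, if_pos hp]
        simp [modifyHead_idfun]
      · rw [if_neg hp]
        have hlen : rest.length < n := by simp at h; omega
        rw [ih _ _ _ hlen]
        rw [sps, if_neg hp]
        rcases hps : sps s sp rest with _ | ⟨p, ps⟩
        · exact absurd hps (sps_ne_nil s sp rest)
        · simp

theorem splitOn_eq_sps (s : Char) (sp l : List Char) :
    PySem.Chars.splitOn l (s :: sp) = sps s sp l := by
  have := go_eq_sps s sp (l.length + 1) l [] [] (by omega)
  simpa [PySem.Chars.splitOn, modifyHead_idfun] using this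

-- the abstract one-pass cut (scanB without the accumulator)
def piecesC : List Char → List (List Char)
  | [] => [[]]
  | c :: rest =>
    if c = '\n' ∧ rest.head? = some '\n' then [] :: piecesC rest.tail
    else if c = '.' then [] :: piecesC rest
    else (piecesC rest).modifyHead (fun p => c :: p)
  termination_by l => l.length
  decreasing_by
    · simp only [List.length_cons]
      simp only [List.length_tail]
      omega
    · simp
    · simp

theorem scanB_eq (l : List Char) :
    ∀ cur, scanB l cur = (piecesC l).modifyHead (fun p => cur ++ p) := by
  induction l using piecesC.induct with
  | case1 => intro cur; simp [scanB, piecesC]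
  | case2 c rest h ih =>
    intro cur
    rw [scanB, if_pos h, piecesC, if_pos h, ih]
    simp [modifyHead_idfun]
  | case3 rest h ih =>
    intro cur
    rw [scanB, if_neg h, if_pos rfl, piecesC, if_neg h, if_pos rfl, ih]
    simp [modifyHead_idfun]
  | case4 c rest h1 h2 ih =>
    intro cur
    rw [scanB, if_neg h1, if_neg h2, piecesC, if_neg h1, if_neg h2, ih]
    rcases piecesC rest with _ | ⟨p, ps⟩
    · simp
    · simp

-- the "\n\n" prefix test in sps is scanB's two-character test
theorem prefix_nlnl (c : Char) (rest : List Char) :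
    (['\n', '\n'] : List Char).isPrefixOf (c :: rest) = true ↔
      (c = '\n' ∧ rest.head? = some '\n') := by
  rw [List.isPrefixOf_iff_prefix]
  cases rest with
  | nil =>
    constructor
    · intro h; rcases List.cons_prefix_cons.mp h with ⟨h1, h2⟩
      exact absurd h2 (by simp)
    · rintro ⟨_, h⟩; simp at h
  | cons d r =>
    constructor
    · intro h
      rcases List.cons_prefix_cons.mp h with ⟨h1, h2⟩
      rcases List.cons_prefix_cons.mp h2 with ⟨h3, _⟩
      exact ⟨h1.symm, by simp [h3.symm]⟩
    · rintro ⟨rfl, hd⟩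
      simp only [List.head?_cons, Option.some.injEq] at hd
      subst hd
      simp [List.cons_prefix_cons]

-- A's two-level split flattens to the one-pass cut
theorem flatMap_sps_eq_piecesC (l : List Char) :
    (sps '\n' ['\n'] l).flatMap (fun item => sps '.' [] item) = piecesC l := by
  induction l using piecesC.induct with
  | case1 => simp [sps, piecesC]
  | case2 c rest h ih =>
    obtain ⟨hc, hd⟩ := h
    cases rest with
    | nil => simp at hd
    | cons d r =>
      simp only [List.head?_cons, Option.some.injEq] at hd
      subst hc; subst hd
      rw [sps, if_pos (by rw [prefix_nlnl]; exact ⟨rfl, rfl⟩)]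
      rw [piecesC, if_pos ⟨rfl, rfl⟩]
      simp only [List.length_cons, List.length_nil, List.drop_succ_cons, List.drop_zero,
        List.tail_cons, List.flatMap_cons] at ih ⊢
      rw [ih]
      show sps '.' [] [] ++ piecesC r = [] :: piecesC r
      rw [sps]
      rfl
  | case3 rest h1 ih =>
    have hnp : ¬ (['\n', '\n'] : List Char).isPrefixOf ('.' :: rest) = true := by
      rw [prefix_nlnl]; exact h1
    rw [sps, if_neg hnp]
    rcases hps : sps '\n' ['\n'] rest with _ | ⟨p, ps⟩
    · exact absurd hps (sps_ne_nil _ _ rest)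
    · rw [hps] at ih
      rw [piecesC, if_neg h1, if_pos rfl]
      simp only [List.flatMap_cons] at ih ⊢
      rw [sps, if_pos (by rw [List.isPrefixOf_iff_prefix]; simp [List.cons_prefix_cons])]
      simp only [List.length_cons, List.length_nil, List.drop_succ_cons, List.drop_zero]
      rw [← ih]
      simp
  | case4 c rest h1 h2 ih =>
    have hnp : ¬ (['\n', '\n'] : List Char).isPrefixOf (c :: rest) = true := by
      rw [prefix_nlnl]; exact h1
    rw [sps, if_neg hnp]
    rcases hps : sps '\n' ['\n'] rest with _ | ⟨p, ps⟩
    · exact absurd hps (sps_ne_nil _ _ rest)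
    · rw [hps] at ih
      rw [piecesC, if_neg h1, if_neg h2]
      simp only [List.flatMap_cons] at ih ⊢
      have hdot : ¬ (['.'] : List Char).isPrefixOf (c :: p) = true := by
        simp [List.isPrefixOf_iff_prefix, List.cons_prefix_cons]
        intro hc; exact h2 hc.symm
      rw [sps, if_neg hdot]
      rcases hps2 : sps '.' [] p with _ | ⟨q, qs⟩
      · exact absurd hps2 (sps_ne_nil _ _ p)
      · rw [hps2] at ih
        rw [← ih]
        simp
theorem tfw_eq (t : List Char) (ws : List String) :
    tfw_go t ws = !(ws.any (fun w => PySem.Chars.isIn w.toList t)) := by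
  induction ws with
  | nil => simp [tfw_go]
  | cons w rest ih => by_cases h : PySem.Chars.isIn w.toList t <;> simp [tfw_go, h, ih]

theorem foldl_extend_eq_flatMap (xs : List (List Char)) (f : List Char → List (List Char)) :
    ∀ init, xs.foldl (fun acc item => acc ++ f item) init = init ++ xs.flatMap f := by
  induction xs with
  | nil => simp
  | cons x rest ih => intro init; simp [List.foldl_cons, ih, List.flatMap_cons]

-- ===== VERDICT (by name: the statement is the Claim_ definition above) =====
theorem preprocess_email_spec : Claim_equal_preprocess_email := by
  intro email _
  unfold Spec_preprocess_email
  simp only [preprocess_email, preprocess_email_alt]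
  have hsep : ("\n\n".toList : List Char) = '\n' :: ['\n'] := by decide
  have hdot : (".".toList : List Char) = '.' :: [] := by decide
  rw [hsep, hdot, splitOn_eq_sps]
  have hlists :
      ((sps '\n' ['\n'] email.toList).foldl
        (fun acc item => acc ++ PySem.Chars.splitOn item ('.' :: [])) []) =
      scanB email.toList [] := by
    calc (sps '\n' ['\n'] email.toList).foldl
          (fun acc item => acc ++ PySem.Chars.splitOn item ('.' :: [])) []
        = (sps '\n' ['\n'] email.toList).foldl
          (fun acc item => acc ++ sps '.' [] item) [] := by
          congr 1
          funext acc item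
          rw [splitOn_eq_sps]
      _ = (sps '\n' ['\n'] email.toList).flatMap (fun item => sps '.' [] item) := by
          rw [foldl_extend_eq_flatMap]; simp
      _ = piecesC email.toList := flatMap_sps_eq_piecesC email.toList
      _ = scanB email.toList [] := by rw [scanB_eq]; simp [modifyHead_idfun]
  rw [hlists]
  congr 1
  funext result text0
  simp only [test_filter_words, tfw_eq, text_len]
  have hcomm : ∀ (a b c : Bool), (a && !b && c) = (a && c && !b) := by decide
  rw [hcomm]
  rfl
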